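-- pv_equiv track=rewrite | github.com/Sibdroid/538-answers | 538-number-pairs.py | find_most_common_pairs
-- ===== SOURCE A (Python) =====
-- import typing as t
-- from collections import Counter
--
-- def get_sequence(length: int, n: int=1) -> t.Generator[int, None, None]:
--     """Yields numbers from (n, n+2, n+5, n+9...) sequence.
--
--     Args:
--         length (int): the length of the sequence.
--         n (int): the starting value, defaults to 1.
--
--     Yields:
--         Consecutive numbers of the sequence.
--     """
--     yield n
--     for i in range(2, length+1):
--         n += i
--         yield n
--
-- def find_most_common_pairs(length: int) -> t.Generator[int, None, None]:
--     """Yields most common end pairs of numbers in (1, 3, 6, 10, 15) sequence.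
--
--     Args:
--         length (int): the length of the sequence.
--
--     Yields:
--         Most common end pairs of numbers in the sequence.
--     """
--     pairs = []
--     for number in get_sequence(length):
--         number = str(number)
--         if len(number) > 1:
--             pairs += [number[-2:]]
--     occurences = Counter(pairs)
--     max_occurrence = max(occurences.values())
--     for i, j in occurences.items():
--         if j == max_occurrence:
--             yield int(i)
-- ===== SOURCE B (Python) =====
-- def find_most_common_pairs(length):
--     """O(1): triangular numbers' last-two-digit patterns repeat with period 200 in n;
--     count each residue over one period, scaled by how many class members are <= length."""
--     counts = {}
--     for n0 in range(4, 204):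
--         r = (n0 * (n0 + 1) // 2) % 100
--         if n0 > length:
--             c = 0
--         else:
--             c = (length - n0) // 200 + 1
--         if c > 0:
--             counts[r] = counts.get(r, 0) + c
--     m = max(counts.values())
--     return [r for r, c in counts.items() if c == m]
-- ===== Notes on version B (the rewrite author's own statement) =====
-- stated objective: faster
-- what changed: A generates all `length` triangular numbers and counts their last-two-digit strings; B exploits the period-200 periodicity of triangular numbers mod 100 and counts each of the 200 residue-class representatives once, scaling by how many class members are <= length, so the work is a fixed 200 iterations instead of O(length) big-int string work.
import Mathlib
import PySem

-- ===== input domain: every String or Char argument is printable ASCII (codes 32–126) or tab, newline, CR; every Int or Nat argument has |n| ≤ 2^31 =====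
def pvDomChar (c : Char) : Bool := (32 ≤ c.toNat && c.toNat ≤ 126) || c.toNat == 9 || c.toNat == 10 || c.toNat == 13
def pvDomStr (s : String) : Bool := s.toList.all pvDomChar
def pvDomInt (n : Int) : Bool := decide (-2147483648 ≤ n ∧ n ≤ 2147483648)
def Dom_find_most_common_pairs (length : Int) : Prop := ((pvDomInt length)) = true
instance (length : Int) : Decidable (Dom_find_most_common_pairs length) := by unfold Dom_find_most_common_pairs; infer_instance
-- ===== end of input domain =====

-- B replaces A's O(length) scan of all triangular numbers by a fixed 200-iteration
-- count using the period-200 periodicity of triangular numbers mod 100 (faster, asymptotic).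


-- ===== PORT A =====
-- get_sequence is inlined as the fold it is: state (n, yielded-so-far).
def find_most_common_pairs (length : Int) : List Int :=
  -- get_sequence(length): n = 1 is yielded, then for i in range(2, length+1): n += i; yield n
  let st := (PySem.List.pyRange 2 (length + 1) 1).foldl
      (fun (st : Int × List Int) i => (st.1 + i, st.2 ++ [st.1 + i])) ((1 : Int), [(1 : Int)])
  let pairs := st.2.foldl (fun (acc : List String) number =>
      let number := PySem.Int.toStr number
      if 1 < PySem.Str.len number then acc ++ [PySem.Str.slice number (some (-2)) none] else acc) []
  let occurences := PySem.Dict.counter pairs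
  match PySem.List.max? occurences.values (fun v => v) with
  | none => []  -- Python: max() on an empty Counter raises ValueError (length ≤ 3); excluded by Pre_
  | some max_occurrence =>
      occurences.items.foldl (fun (out : List Int) ij =>
        -- int(i): the keys are two-digit strings, so int() never raises here
        if ij.2 == max_occurrence then out ++ [(PySem.Int.ofStr? ij.1).getD 0] else out) []

-- ===== PORT B =====
def find_most_common_pairs_alt (length : Int) : List Int :=
  let counts := (PySem.List.pyRange 4 204 1).foldl
      (fun (d : PySem.Dict Int Int) n0 =>
        let r := PySem.Int.mod (PySem.Int.floordiv (n0 * (n0 + 1)) 2) 100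
        let c := if length < n0 then 0 else PySem.Int.floordiv (length - n0) 200 + 1
        if 0 < c then d.insert r (d.getD r 0 + c) else d)
      PySem.Dict.empty
  match PySem.List.max? counts.values (fun v => v) with
  | none => []  -- max() on an empty dict raises ValueError (length ≤ 3); excluded by Pre_
  | some m =>
      counts.items.foldl (fun (out : List Int) rc =>
        if rc.2 == m then out ++ [rc.1] else out) []

-- ===== PRECONDITION & SPEC =====
-- Pre_: for length ≤ 3 no triangular number has two digits, so Python's max() raises ValueError.
def Pre_find_most_common_pairs (length : Int) : Prop := 4 ≤ length
instance (length : Int) : Decidable (Pre_find_most_common_pairs length) := by unfold Pre_find_most_common_pairs; infer_instance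
def pvWitness_find_most_common_pairs : Int := 4
def Spec_find_most_common_pairs (length : Int) (out : List Int) : Prop := out = find_most_common_pairs_alt length
instance (length : Int) (out : List Int) : Decidable (Spec_find_most_common_pairs length out) := by unfold Spec_find_most_common_pairs; infer_instance

-- ===== CLAIM (what is proved, stated in full; the proofs are below) =====
def Claim_equal_find_most_common_pairs : Prop := ∀ (length : Int), Dom_find_most_common_pairs length → Pre_find_most_common_pairs length → Spec_find_most_common_pairs length (find_most_common_pairs length)

-- ===== LEMMAS AND PROOFS =====

-- T n = n(n+1)//2, the n-th triangular number, and g n = its last two digits.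
def Tf (n : Int) : Int := PySem.Int.floordiv (n * (n + 1)) 2
def gg (n : Int) : Int := PySem.Int.mod (Tf n) 100
-- the two decimal digit characters of m < 100
def dig2 (m : Nat) : List Char := [Nat.digitChar (m / 10), Nat.digitChar (m % 10)]
def twoDig (r : Int) : String := String.ofList (dig2 r.toNat)
-- B's per-class count: how many n ≡ n0 (mod 200) with n0 ≤ n ≤ L
def cnt (L n0 : Int) : Int := if L < n0 then 0 else PySem.Int.floordiv (L - n0) 200 + 1
-- the residue stream g 4, g 5, …, g (3+m)  (what A counts, by value)
def rsL (m : Nat) : List Int := (List.range m).map (fun k : Nat => gg (4 + (k : Int)))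
-- B's flattened count stream: each class representative repeated its class count
def flatB (L : Int) : List Int :=
  (List.range 200).flatMap (fun k : Nat =>
    List.replicate (cnt L (4 + (k : Int))).toNat (gg (4 + (k : Int))))
-- the common canonical value of both programs
def canon (m : Nat) : List Int :=
  match PySem.List.max? ((PySem.Set.ofList (rsL m)).map (fun r => ((rsL m).count r : Int))) (fun v => v) with
  | none => []
  | some mv => (PySem.Set.ofList (rsL m)).filter (fun r => (((rsL m).count r : Int) == mv))

theorem two_Tf (n : Int) : 2 * Tf n = n * (n + 1) := by
  have h := PySem.Int.floordiv_mul_add_mod (n * (n + 1)) 2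
  have h2 : PySem.Int.mod (n * (n + 1)) 2 = 0 :=
    (PySem.Int.mod_eq_zero_iff_dvd _ _).mpr (Int.even_mul_succ_self n).two_dvd
  unfold Tf; omega

theorem Tf_succ (n : Int) : Tf (n + 1) = Tf n + (n + 1) := by
  have a := two_Tf n
  have b := two_Tf (n + 1)
  nlinarith [a, b]

theorem Tf_ge10 (k : Nat) : 10 ≤ Tf (4 + (k : Int)) := by
  have a := two_Tf (4 + (k : Int))
  have hk : (0:Int) ≤ (k:Int) := Int.natCast_nonneg k
  nlinarith [a, hk]

theorem gg_lb (n : Int) : 0 ≤ gg n := PySem.Int.mod_nonneg _ (by norm_num)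
theorem gg_ub (n : Int) : gg n < 100 := PySem.Int.mod_lt _ (by norm_num)

theorem gg_period (n : Int) : gg (n + 200) = gg n := by
  have a := two_Tf n
  have b := two_Tf (n + 200)
  have hT : Tf (n + 200) = Tf n + 100 * (2 * n + 201) := by nlinarith [a, b]
  unfold gg
  rw [hT, PySem.Int.mod_eq_emod_of_pos (by norm_num), PySem.Int.mod_eq_emod_of_pos (by norm_num)]
  omega

theorem gg_reduce (k : Nat) : gg (4 + (k : Int)) = gg (4 + ((k % 200 : Nat) : Int)) := by
  induction k using Nat.strong_induction_on with
  | _ k ih =>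
    by_cases h : k < 200
    · rw [Nat.mod_eq_of_lt h]
    · have : (4 + (k:Int)) = (4 + ((k-200 : Nat):Int)) + 200 := by omega
      rw [this, gg_period, ih (k-200) (by omega)]
      have h3 : (k - 200) % 200 = k % 200 := by omega
      rw [h3]

-- decimal digits of m, most significant first (what Nat.toDigits computes)
def natRep (m : Nat) : List Char :=
  if _h : m < 10 then [Nat.digitChar m] else natRep (m / 10) ++ [Nat.digitChar (m % 10)]
  termination_by m
  decreasing_by exact Nat.div_lt_self (by omega) (by omega)

theorem toDigitsCore_eq (m : Nat) : ∀ (fuel : Nat) (ds : List Char), m < fuel →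
    Nat.toDigitsCore 10 fuel m ds = natRep m ++ ds := by
  induction m using Nat.strong_induction_on with
  | _ m ih =>
    intro fuel ds hf
    match fuel, hf with
    | f + 1, hf =>
      rw [Nat.toDigitsCore]
      by_cases h : m < 10
      · have hd : m / 10 = 0 := Nat.div_eq_of_lt h
        rw [if_pos hd]
        rw [natRep]
        have hm : m % 10 = m := Nat.mod_eq_of_lt h
        simp [h, hm]
      · have hd : m / 10 ≠ 0 := by omega
        rw [if_neg hd]
        rw [ih (m / 10) (Nat.div_lt_self (by omega) (by omega)) f (Nat.digitChar (m % 10) :: ds)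
            (by have := Nat.div_lt_self (show 0 < m by omega) (show 1 < 10 by omega); omega)]
        conv_rhs => rw [natRep]
        simp [h]

theorem toDigits_eq (m : Nat) : Nat.toDigits 10 m = natRep m := by
  rw [Nat.toDigits, toDigitsCore_eq m (m+1) [] (by omega), List.append_nil]

theorem natRep_last2 (m : Nat) (h : 10 ≤ m) : ∃ pre, natRep m = pre ++ dig2 (m % 100) := by
  have h1 : dig2 (m % 100) = [Nat.digitChar (m / 10 % 10), Nat.digitChar (m % 10)] := by
    unfold dig2
    have e1 : m % 100 / 10 = m / 10 % 10 := by omega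
    have e2 : m % 100 % 10 = m % 10 := by omega
    rw [e1, e2]
  rw [h1, natRep]
  simp only [dif_neg (by omega : ¬ m < 10)]
  by_cases h2 : m / 10 < 10
  · refine ⟨[], ?_⟩
    rw [natRep]
    simp [h2, Nat.mod_eq_of_lt h2]
  · refine ⟨natRep (m / 10 / 10), ?_⟩
    conv_lhs => rw [natRep]
    simp [h2]

theorem toChars_eq (t : Int) (h : 0 ≤ t) : PySem.Int.toChars t = natRep t.toNat := by
  unfold PySem.Int.toChars
  rw [if_neg (by omega), toDigits_eq]

theorem str_len_gt1 (t : Int) (h : 10 ≤ t) : 1 < PySem.Str.len (PySem.Int.toStr t) := by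
  obtain ⟨pre, hp⟩ := natRep_last2 t.toNat (by omega)
  unfold PySem.Str.len PySem.Int.toStr
  rw [String.toList_ofList, toChars_eq t (by omega), hp]
  simp [dig2]
  omega

theorem str_slice2 (t : Int) (h : 10 ≤ t) :
    PySem.Str.slice (PySem.Int.toStr t) (some (-2)) none = twoDig (PySem.Int.mod t 100) := by
  obtain ⟨pre, hp⟩ := natRep_last2 t.toNat (by omega)
  unfold PySem.Str.slice PySem.Int.toStr
  rw [String.toList_ofList]
  rw [PySem.Chars.slice_eq_listSlice]
  rw [PySem.List.slice_from_neg_ofNat _ 2 (by omega)]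
  rw [toChars_eq t (by omega), hp]
  have hlen : (pre ++ dig2 (t.toNat % 100)).length - 2 = pre.length := by
    simp [dig2]
  rw [hlen, List.drop_left]
  unfold twoDig
  congr 1
  have : (PySem.Int.mod t 100).toNat = t.toNat % 100 := by
    rw [PySem.Int.mod_eq_emod_of_pos (by norm_num)]
    omega
  rw [this]

theorem parse_twoDigN : ∀ m : Nat, m < 100 → PySem.Int.ofChars? (dig2 m) = some (m : Int) := by decide

theorem parse_twoDig (r : Int) (h0 : 0 ≤ r) (h1 : r < 100) :
    PySem.Int.ofStr? (twoDig r) = some r := by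
  unfold PySem.Int.ofStr? twoDig
  rw [String.toList_ofList, parse_twoDigN r.toNat (by omega)]
  congr 1
  omega

theorem digitChar_inj : ∀ a : Nat, a < 10 → ∀ b : Nat, b < 10 → Nat.digitChar a = Nat.digitChar b → a = b := by decide

theorem twoDig_inj (r s : Int) (hr0 : 0 ≤ r) (hr1 : r < 100) (hs0 : 0 ≤ s) (hs1 : s < 100)
    (h : twoDig r = twoDig s) : r = s := by
  unfold twoDig at h
  have h2 : dig2 r.toNat = dig2 s.toNat := by
    have := congrArg String.toList h
    rwa [String.toList_ofList, String.toList_ofList] at this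
  unfold dig2 at h2
  simp only [List.cons.injEq] at h2
  have e1 := digitChar_inj (r.toNat / 10) (by omega) (s.toNat / 10) (by omega) h2.1
  have e2 := digitChar_inj (r.toNat % 10) (by omega) (s.toNat % 10) (by omega) h2.2.1
  omega

theorem rsL_bounds (m : Nat) (x : Int) (hx : x ∈ rsL m) : 0 ≤ x ∧ x < 100 := by
  obtain ⟨k, _, he⟩ := List.mem_map.mp hx
  exact he ▸ ⟨gg_lb _, gg_ub _⟩

-- the get_sequence loop
theorem seqA (M : Nat) :
    (PySem.List.pyRange 2 (2 + (M : Int)) 1).foldl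
      (fun (st : Int × List Int) i => (st.1 + i, st.2 ++ [st.1 + i])) ((1 : Int), [(1 : Int)])
    = (Tf (1 + M), (List.range (M + 1)).map (fun k : Nat => Tf (1 + (k : Int)))) := by
  induction M with
  | zero =>
    rw [show (2 + ((0:Nat):Int)) = 2 by norm_num, PySem.List.pyRange_one_eq_nil (by omega)]
    simp only [List.foldl_nil]
    norm_num
    decide
  | succ M ih =>
    have hsplit : PySem.List.pyRange 2 (2 + ((M + 1 : Nat) : Int)) 1
        = PySem.List.pyRange 2 (2 + (M : Int)) 1 ++ [2 + (M : Int)] := by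
      have : (2 + ((M + 1 : Nat) : Int)) = (2 + (M : Int)) + 1 := by push_cast; ring
      rw [this, PySem.List.pyRange_one_succ_right (by omega)]
    rw [hsplit, List.foldl_append, ih]
    simp only [List.foldl_cons, List.foldl_nil]
    rw [List.range_succ (n := M + 1), List.map_append]
    push_cast
    have h2 := Tf_succ (1 + (M : Int))
    have h1 : Tf (1 + (M : Int)) + (2 + (M : Int)) = Tf (1 + (M : Int) + 1) := by omega
    have h3 : Tf (1 + ((M : Int) + 1)) = Tf (1 + (M : Int) + 1) := by ring_nf
    simp only [Prod.mk.injEq, List.map_cons, List.map_nil]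
    refine ⟨by omega, ?_⟩
    congr 1
    rw [show ((M + 1 : Nat) : Int) = (M : Int) + 1 by push_cast; ring, h3, ← h1]

-- A's pairs list: the two-digit strings of g 4 … g (3+m)
theorem pairsA (m : Nat) :
    ((List.range (3 + m)).map (fun k : Nat => Tf (1 + (k : Int)))).foldl
      (fun (acc : List String) number =>
        let number := PySem.Int.toStr number
        if 1 < PySem.Str.len number then acc ++ [PySem.Str.slice number (some (-2)) none] else acc) []
    = (rsL m).map twoDig := by
  have hsplit : List.range (3 + m) = List.range 3 ++ (List.range m).map (fun k => 3 + k) :=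
    List.range_add
  rw [hsplit, List.map_append, List.foldl_append]
  have h3 : (List.range 3).map (fun k : Nat => Tf (1 + (k : Int))) = [1, 3, 6] := by decide
  rw [h3]
  have hstart : List.foldl
      (fun (acc : List String) number =>
        let number := PySem.Int.toStr number
        if 1 < PySem.Str.len number then acc ++ [PySem.Str.slice number (some (-2)) none] else acc)
      ([] : List String) [(1:Int), 3, 6] = ([] : List String) := by decide
  rw [hstart]
  rw [List.map_map]
  rw [List.foldl_map]
  simp only [Function.comp_def]
  have hfold : ∀ (ks : List Nat) (acc : List String),
      List.foldl
        (fun (acc : List String) k =>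
          let number := PySem.Int.toStr (Tf (1 + ((3 + k : Nat) : Int)))
          if 1 < PySem.Str.len number then acc ++ [PySem.Str.slice number (some (-2)) none] else acc)
        acc ks = acc ++ ks.map (fun k : Nat => twoDig (gg (4 + (k : Int)))) := by
    intro ks
    induction ks with
    | nil => intro acc; simp
    | cons k t ihk =>
      intro acc
      simp only [List.foldl_cons, List.map_cons]
      have hcast : (1 + (((3 + k : Nat)) : Int)) = 4 + (k : Int) := by push_cast; ring
      have hge := Tf_ge10 k
      rw [hcast]
      simp only [if_pos (str_len_gt1 _ hge)]
      rw [str_slice2 _ hge, ihk]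
      simp [gg]
  rw [hfold (List.range m) []]
  simp [rsL, List.map_map]

-- Set.ofList commutes with an injective-on-the-list map
theorem ofList_map_inj {α β : Type} [BEq α] [LawfulBEq α] [BEq β] [LawfulBEq β]
    (f : α → β) (xs : List α) (hinj : ∀ x ∈ xs, ∀ y ∈ xs, f x = f y → x = y) :
    PySem.Set.ofList (xs.map f) = (PySem.Set.ofList xs).map f := by
  induction xs using List.reverseRecOn with
  | nil => rfl
  | append_singleton t x ih =>
    have hsub : ∀ y ∈ t, y ∈ t ++ [x] := fun y hy => List.mem_append_left _ hy
    have hx : x ∈ t ++ [x] := List.mem_append_right _ (List.mem_singleton_self x)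
    rw [List.map_append, List.map_singleton, PySem.Set.ofList_append_singleton,
        PySem.Set.ofList_append_singleton,
        ih (fun a ha b hb h => hinj a (hsub a ha) b (hsub b hb) h)]
    by_cases hmem : x ∈ PySem.Set.ofList t
    · rw [PySem.Set.add_of_mem hmem, PySem.Set.add_of_mem]
      exact List.mem_map_of_mem hmem
    · rw [PySem.Set.add_of_not_mem hmem, PySem.Set.add_of_not_mem, List.map_append,
        List.map_singleton]
      intro hc
      obtain ⟨y, hy, hyx⟩ := List.mem_map.mp hc
      have hyt : y ∈ t := (PySem.Set.mem_ofList _ _).mp hy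
      exact hmem ((PySem.Set.mem_ofList _ _).mpr (hinj y (hsub y hyt) x hx hyx ▸ hyt))

-- count commutes with an injective-at-a map
theorem count_map_inj {α β : Type} [BEq α] [LawfulBEq α] [BEq β] [LawfulBEq β]
    (f : α → β) (xs : List α) (a : α) (hinj : ∀ x ∈ xs, f x = f a → x = a) :
    (xs.map f).count (f a) = xs.count a := by
  induction xs with
  | nil => rfl
  | cons x t ih =>
    have ih' := ih (fun y hy h => hinj y (List.mem_cons_of_mem _ hy) h)
    simp only [List.map_cons, List.count_cons, ih']
    by_cases h : x = a
    · subst h; simp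
    · have : ¬ (f x = f a) := fun hc => h (hinj x List.mem_cons_self hc)
      simp [h, this, beq_iff_eq]

-- counting into a dict c times = counting one at a time c times
theorem replicate_modify (r : Int) : ∀ (j : Nat) (d : PySem.Dict Int Int), 0 < j →
    (List.replicate j r).foldl (fun d x => d.modify x 0 (· + 1)) d
      = d.insert r (d.getD r 0 + (j : Int)) := by
  intro j
  induction j with
  | zero => intro d h; omega
  | succ j ih =>
    intro d _
    by_cases hj : 0 < j
    · rw [List.replicate_succ, List.foldl_cons, ih _ hj]
      rw [PySem.Dict.modify]
      rw [PySem.Dict.getD_insert_self, PySem.Dict.insert_insert_self]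
      congr 1
      push_cast
      ring
    · have : j = 0 := by omega
      subst this
      simp only [List.replicate_succ, List.replicate_zero, List.foldl_cons, List.foldl_nil]
      rw [PySem.Dict.modify]
      norm_num

-- B's dict loop is the Counter of the flattened stream
theorem bfold_eq (L : Int) : ∀ (l : List Int) (d : PySem.Dict Int Int),
    l.foldl (fun d n0 =>
        let r := gg n0
        let c := cnt L n0
        if 0 < c then d.insert r (d.getD r 0 + c) else d) d
    = (l.flatMap (fun n0 => List.replicate (cnt L n0).toNat (gg n0))).foldl
        (fun d x => d.modify x 0 (· + 1)) d := by
  intro l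
  induction l with
  | nil => intro d; rfl
  | cons n0 t ih =>
    intro d
    simp only [List.foldl_cons, List.flatMap_cons, List.foldl_append]
    by_cases hc : 0 < cnt L n0
    · rw [if_pos hc, ih, replicate_modify _ _ _ (by omega),
        Int.toNat_of_nonneg (le_of_lt hc)]
    · rw [if_neg hc]
      have : (cnt L n0).toNat = 0 := by omega
      rw [this, List.replicate_zero, List.foldl_nil, ih]

-- count of a flatMap is the sum of block counts
theorem count_flatMap {α β : Type} [BEq β] (l : List α) (F : α → List β) (r : β) :
    ((l.flatMap F).count r) = (l.map (fun k => (F k).count r)).sum := by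
  induction l with
  | nil => rfl
  | cons x t ih => simp [List.flatMap_cons, List.count_append, ih]

theorem sum_indicator (n k0 : Nat) (v : Nat → Nat) (h : k0 < n) :
    ((List.range n).map (fun k => if k = k0 then v k else 0)).sum = v k0 := by
  induction n with
  | zero => omega
  | succ n ih =>
    rw [List.range_succ, List.map_append, List.sum_append]
    by_cases hk : k0 < n
    · rw [ih hk]; simp; omega
    · have : k0 = n := by omega
      subst this
      simp
      apply List.sum_eq_zero
      intro x hx
      simp only [List.mem_map, List.mem_range] at hx
      obtain ⟨k, hk2, he⟩ := hx
      rw [if_neg (by omega)] at he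
      omega

-- the per-class count gains exactly one member at n = L+1, in the class of L+1
theorem cnt_step (m k : Nat) (hk : k < 200) :
    (cnt (3 + (m : Int) + 1) (4 + (k : Int))).toNat
      = (cnt (3 + (m : Int)) (4 + (k : Int))).toNat + (if k = m % 200 then 1 else 0) := by
  unfold cnt
  rw [PySem.Int.floordiv_eq_ediv_of_pos (by norm_num),
      PySem.Int.floordiv_eq_ediv_of_pos (by norm_num)]
  split_ifs <;> omega

-- A's residue stream and B's flattened stream have the same counts
theorem count_eq (m : Nat) (r : Int) : (rsL m).count r = (flatB (3 + (m : Int))).count r := by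
  rw [flatB, count_flatMap]
  induction m with
  | zero =>
    simp only [rsL, List.range_zero, List.map_nil, List.count_nil]
    symm
    apply List.sum_eq_zero
    intro x hx
    simp only [List.mem_map, List.mem_range] at hx
    obtain ⟨k, hk, he⟩ := hx
    have : (cnt (3 + ((0:Nat) : Int)) (4 + (k : Int))).toNat = 0 := by
      unfold cnt
      rw [if_pos (by push_cast; omega)]
      simp
    rw [this] at he
    simp at he
    omega
  | succ m ih =>
    have hsplit : rsL (m + 1) = rsL m ++ [gg (4 + (m : Int))] := by
      rw [rsL, List.range_succ, List.map_append]; rfl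
    rw [hsplit, List.count_append]
    have hcast : (3 + ((m + 1 : Nat) : Int)) = 3 + (m : Int) + 1 := by push_cast; ring
    rw [hcast]
    have hpt : ∀ k : Nat, k < 200 →
        (List.replicate (cnt (3 + (m : Int) + 1) (4 + (k : Int))).toNat (gg (4 + (k : Int)))).count r
        = (List.replicate (cnt (3 + (m : Int)) (4 + (k : Int))).toNat (gg (4 + (k : Int)))).count r
          + (if k = m % 200 then (if gg (4 + (k : Int)) = r then 1 else 0) else 0) := by
      intro k hk
      rw [List.count_replicate, List.count_replicate, cnt_step m k hk]
      by_cases hg : gg (4 + (k : Int)) = r <;> simp [hg]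
    have hmapeq : (List.range 200).map
          (fun k : Nat => (List.replicate (cnt (3 + (m : Int) + 1) (4 + (k : Int))).toNat (gg (4 + (k : Int)))).count r)
        = (List.range 200).map (fun k : Nat =>
            (List.replicate (cnt (3 + (m : Int)) (4 + (k : Int))).toNat (gg (4 + (k : Int)))).count r
            + (if k = m % 200 then (if gg (4 + (k : Int)) = r then 1 else 0) else 0)) := by
      apply List.map_congr_left
      intro k hk
      exact hpt k (List.mem_range.mp hk)
    rw [hmapeq, List.sum_map_add, ← ih, sum_indicator 200 (m % 200) _ (by omega), ← gg_reduce m]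
    by_cases hg : gg (4 + (m : Int)) = r
    · simp [hg]
    · simp [hg]

-- absorb: adding elements already present changes nothing
theorem foldl_add_absorb {α : Type} [BEq α] [LawfulBEq α] :
    ∀ (ys : List α) (s : PySem.Set α), (∀ y ∈ ys, y ∈ s) → ys.foldl PySem.Set.add s = s := by
  intro ys
  induction ys with
  | nil => intro s _; rfl
  | cons y t ih =>
    intro s h
    simp only [List.foldl_cons]
    rw [PySem.Set.add_of_mem (h y List.mem_cons_self)]
    exact ih s (fun z hz => h z (List.mem_cons_of_mem _ hz))

-- folding add over a replicate block = one add (or nothing)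
theorem foldl_add_replicate {α : Type} [BEq α] [LawfulBEq α] (x : α) :
    ∀ (j : Nat) (s : PySem.Set α),
      (List.replicate j x).foldl PySem.Set.add s = if j = 0 then s else PySem.Set.add s x := by
  intro j
  induction j with
  | zero => intro s; rfl
  | succ j ih =>
    intro s
    rw [List.replicate_succ, List.foldl_cons, ih]
    by_cases hj : j = 0
    · simp [hj]
    · rw [if_neg hj, if_neg (by omega)]
      rw [PySem.Set.add_of_mem ((PySem.Set.mem_add _ _ _).mpr (Or.inr rfl))]

theorem cnt_pos_iff (m k : Nat) : (cnt (3 + (m : Int)) (4 + (k : Int))).toNat = 0 ↔ m ≤ k := by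
  unfold cnt
  by_cases h : (3 + (m : Int)) < 4 + (k : Int)
  · rw [if_pos h]; simp; omega
  · rw [if_neg h, PySem.Int.floordiv_eq_ediv_of_pos (by norm_num)]
    push_cast at h ⊢
    omega

theorem fold_flat_eq (m : Nat) : ∀ (n : Nat) (s : PySem.Set Int),
    ((List.range n).flatMap (fun k : Nat =>
        List.replicate (cnt (3 + (m : Int)) (4 + (k : Int))).toNat (gg (4 + (k : Int))))).foldl PySem.Set.add s
    = ((List.range (min m n)).map (fun k : Nat => gg (4 + (k : Int)))).foldl PySem.Set.add s := by
  intro n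
  induction n with
  | zero => intro s; simp
  | succ n ih =>
    intro s
    rw [List.range_succ, List.flatMap_append, List.foldl_append, ih, List.flatMap_singleton,
        foldl_add_replicate]
    by_cases hn : n < m
    · rw [if_neg (by rw [cnt_pos_iff]; omega)]
      rw [min_eq_right (by omega : n + 1 ≤ m), min_eq_right (by omega : n ≤ m)]
      rw [List.range_succ, List.map_append, List.foldl_append]
      rfl
    · rw [if_pos (by rw [cnt_pos_iff]; omega)]
      rw [show min m (n + 1) = min m n by omega]

theorem ofList_rs_min (m : Nat) :
    PySem.Set.ofList (rsL m) = PySem.Set.ofList (rsL (min m 200)) := by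
  by_cases h : m ≤ 200
  · rw [min_eq_left h]
  · rw [min_eq_right (by omega : 200 ≤ m)]
    have hm : m = 200 + (m - 200) := by omega
    have hsplit : rsL m = rsL 200 ++ ((List.range (m - 200)).map (fun j : Nat => gg (4 + ((200 + j : Nat) : Int)))) := by
      rw [rsL, rsL]
      conv_lhs => rw [hm]
      rw [List.range_add, List.map_append, List.map_map]
      rfl
    rw [hsplit, PySem.Set.ofList_append]
    have hupd : ∀ (s : PySem.Set Int) (ys : List Int), PySem.Set.update s ys = ys.foldl PySem.Set.add s := fun _ _ => rfl
    rw [hupd]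
    apply foldl_add_absorb
    intro y hy
    simp only [List.mem_map, List.mem_range] at hy
    obtain ⟨j, hj, he⟩ := hy
    rw [gg_reduce (200 + j)] at he
    have : (200 + j) % 200 = j % 200 := by omega
    rw [this] at he
    rw [PySem.Set.mem_ofList, rsL, ← he]
    exact List.mem_map_of_mem (List.mem_range.mpr (by omega : j % 200 < 200))

-- A's residue stream and B's flattened stream produce the same key order
theorem ofList_flat_eq (m : Nat) :
    PySem.Set.ofList (flatB (3 + (m : Int))) = PySem.Set.ofList (rsL m) := by
  have h1 : PySem.Set.ofList (flatB (3 + (m : Int)))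
      = ((List.range (min m 200)).map (fun k : Nat => gg (4 + (k : Int)))).foldl PySem.Set.add PySem.Set.empty := by
    rw [PySem.Set.ofList_eq_foldl, flatB, fold_flat_eq]
    rfl
  rw [h1, ofList_rs_min, rsL, PySem.Set.ofList_eq_foldl]
  rfl

-- A computes the canonical value
theorem a_char (m : Nat) : find_most_common_pairs (3 + (m : Int)) = canon m := by
  unfold find_most_common_pairs
  have hseq : (PySem.List.pyRange 2 ((3 + (m : Int)) + 1) 1).foldl
      (fun (st : Int × List Int) i => (st.1 + i, st.2 ++ [st.1 + i])) ((1 : Int), [(1 : Int)])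
      = (Tf (1 + ((m + 2 : Nat) : Int)), (List.range (3 + m)).map (fun k : Nat => Tf (1 + (k : Int)))) := by
    rw [show (3 + (m : Int)) + 1 = 2 + ((m + 2 : Nat) : Int) by push_cast; ring, seqA (m + 2),
        show m + 2 + 1 = 3 + m from by omega]
  rw [hseq]
  show (match PySem.List.max? (PySem.Dict.counter (((List.range (3 + m)).map (fun k : Nat => Tf (1 + (k : Int)))).foldl
      (fun (acc : List String) number =>
        let number := PySem.Int.toStr number
        if 1 < PySem.Str.len number then acc ++ [PySem.Str.slice number (some (-2)) none] else acc) [])).values (fun v => v) with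
    | none => ([] : List Int)
    | some mv => List.foldl (fun out ij => if (ij.2 == mv) = true then out ++ [(PySem.Int.ofStr? ij.1).getD 0] else out) []
        (PySem.Dict.counter (((List.range (3 + m)).map (fun k : Nat => Tf (1 + (k : Int)))).foldl
          (fun (acc : List String) number =>
            let number := PySem.Int.toStr number
            if 1 < PySem.Str.len number then acc ++ [PySem.Str.slice number (some (-2)) none] else acc) [])).items) = canon m
  rw [pairsA m]
  have hinj : ∀ x ∈ rsL m, ∀ y ∈ rsL m, twoDig x = twoDig y → x = y := by
    intro x hx y hy h
    obtain ⟨hx0, hx1⟩ := rsL_bounds m x hx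
    obtain ⟨hy0, hy1⟩ := rsL_bounds m y hy
    exact twoDig_inj x y hx0 hx1 hy0 hy1 h
  have hitems : (PySem.Dict.counter ((rsL m).map twoDig)).items
      = (PySem.Set.ofList (rsL m)).map (fun r => (twoDig r, (((rsL m).count r) : Int))) := by
    rw [PySem.Dict.items_counter, ofList_map_inj twoDig (rsL m) hinj, List.map_map]
    apply List.map_congr_left
    intro r hr
    simp only [Function.comp_def]
    have hrm : r ∈ rsL m := (PySem.Set.mem_ofList _ _).mp hr
    rw [count_map_inj twoDig (rsL m) r (fun x hx h => hinj x hx r hrm h)]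
  have hvals : (PySem.Dict.counter ((rsL m).map twoDig)).values
      = (PySem.Set.ofList (rsL m)).map (fun r => (((rsL m).count r) : Int)) := by
    rw [PySem.Dict.values, hitems, List.map_map]
    rfl
  rw [hvals, hitems, canon]
  cases hmax : PySem.List.max? ((PySem.Set.ofList (rsL m)).map (fun r => (((rsL m).count r) : Int))) (fun v => v) with
  | none => rfl
  | some mv =>
    simp only
    rw [PySem.List.foldl_append_if (fun ij : String × Int => ij.2 == mv)
        (fun ij : String × Int => (PySem.Int.ofStr? ij.1).getD 0)]
    rw [List.filter_map, List.map_map, List.nil_append]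
    simp only [Function.comp_def]
    have hid : ∀ r ∈ (PySem.Set.ofList (rsL m)).filter (fun r => (((rsL m).count r : Int) == mv)),
        (PySem.Int.ofStr? (twoDig r)).getD 0 = r := by
      intro r hr
      have hrm : r ∈ rsL m := (PySem.Set.mem_ofList _ _).mp (List.mem_of_mem_filter hr)
      obtain ⟨h0, h1⟩ := rsL_bounds m r hrm
      rw [parse_twoDig r h0 h1]
      rfl
    rw [List.map_congr_left hid, List.map_id_fun']
    rfl

-- B computes the canonical value
theorem b_char (m : Nat) : find_most_common_pairs_alt (3 + (m : Int)) = canon m := by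
  unfold find_most_common_pairs_alt
  have hdict : (PySem.List.pyRange 4 204 1).foldl
      (fun (d : PySem.Dict Int Int) n0 =>
        let r := PySem.Int.mod (PySem.Int.floordiv (n0 * (n0 + 1)) 2) 100
        let c := if 3 + (m : Int) < n0 then 0 else PySem.Int.floordiv (3 + (m : Int) - n0) 200 + 1
        if 0 < c then d.insert r (d.getD r 0 + c) else d) PySem.Dict.empty
      = PySem.Dict.counter (flatB (3 + (m : Int))) := by
    have hstep : (fun (d : PySem.Dict Int Int) n0 =>
        let r := PySem.Int.mod (PySem.Int.floordiv (n0 * (n0 + 1)) 2) 100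
        let c := if 3 + (m : Int) < n0 then 0 else PySem.Int.floordiv (3 + (m : Int) - n0) 200 + 1
        if 0 < c then d.insert r (d.getD r 0 + c) else d)
      = (fun (d : PySem.Dict Int Int) n0 =>
        let r := gg n0
        let c := cnt (3 + (m : Int)) n0
        if 0 < c then d.insert r (d.getD r 0 + c) else d) := rfl
    rw [hstep, bfold_eq]
    have hrange : PySem.List.pyRange 4 204 1 = (List.range 200).map (fun k : Nat => 4 + (k : Int)) := by
      rw [PySem.List.pyRange_one]
      rfl
    rw [hrange, List.flatMap_map]
    rfl
  rw [hdict]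
  have hitems : (PySem.Dict.counter (flatB (3 + (m : Int)))).items
      = (PySem.Set.ofList (rsL m)).map (fun r => (r, (((rsL m).count r) : Int))) := by
    rw [PySem.Dict.items_counter, ofList_flat_eq]
    apply List.map_congr_left
    intro r _
    rw [← count_eq]
  have hvals : (PySem.Dict.counter (flatB (3 + (m : Int)))).values
      = (PySem.Set.ofList (rsL m)).map (fun r => (((rsL m).count r) : Int)) := by
    rw [PySem.Dict.values, hitems, List.map_map]
    rfl
  show (match PySem.List.max? (PySem.Dict.counter (flatB (3 + (m:Int)))).values (fun v => v) with
    | none => ([] : List Int)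
    | some mv => List.foldl (fun out rc => if (rc.2 == mv) = true then out ++ [rc.1] else out) []
        (PySem.Dict.counter (flatB (3 + (m:Int)))).items) = canon m
  rw [hvals, hitems, canon]
  cases hmax : PySem.List.max? ((PySem.Set.ofList (rsL m)).map (fun r => (((rsL m).count r) : Int))) (fun v => v) with
  | none => rfl
  | some mv =>
    simp only
    rw [PySem.List.foldl_append_if (fun rc : Int × Int => rc.2 == mv) (fun rc : Int × Int => rc.1)]
    rw [List.filter_map, List.map_map, List.nil_append]
    simp only [Function.comp_def]
    rw [List.map_id_fun']
    rfl

-- ===== VERDICT (by name: the statement is the Claim_ definition above) =====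
theorem find_most_common_pairs_spec : Claim_equal_find_most_common_pairs := by
  intro length _ hpre
  unfold Spec_find_most_common_pairs
  have hm : length = 3 + (((length - 3).toNat : Nat) : Int) := by
    unfold Pre_find_most_common_pairs at hpre
    omega
  rw [hm, a_char, b_char]
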